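-- pv_equiv track=rewrite | github.com/xsbai93/CodingInterview4Python | chapter_2/section_3/question_5.py | replaceSpace2
-- ===== SOURCE A (Python) =====
-- def replaceSpace2(s):
--     num_space = 0
--     for i in s:
--         if i == ' ':
--             num_space += 1
--
--     new_length = len(s) + 2 * num_space
--     index_origin = len(s) - 1
--     index_new = new_length - 1
--     new_string = [None for i in range(new_length)]
--
--     while index_origin >= 0 & (index_new > index_origin):
--         if s[index_origin] == ' ':
--             new_string[index_new] = '0'
--             index_new -= 1
--             new_string[index_new] = '2'
--             index_new -= 1
--             new_string[index_new] = '%'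
--             index_new -= 1
--         else:
--             new_string[index_new] = s[index_origin]
--             index_new -= 1
--         index_origin -= 1
--     return ''.join(new_string)
-- ===== SOURCE B (Python) =====
-- def replaceSpace2(s):
--     return s.replace(' ', '%20')
-- ===== Notes on version B (the rewrite author's own statement) =====
-- stated objective: idiomatic
-- what changed: Replaced the two-pass count-then-backward-fill into a preallocated list by a single str.replace(' ', '%20') call.
import Mathlib
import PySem

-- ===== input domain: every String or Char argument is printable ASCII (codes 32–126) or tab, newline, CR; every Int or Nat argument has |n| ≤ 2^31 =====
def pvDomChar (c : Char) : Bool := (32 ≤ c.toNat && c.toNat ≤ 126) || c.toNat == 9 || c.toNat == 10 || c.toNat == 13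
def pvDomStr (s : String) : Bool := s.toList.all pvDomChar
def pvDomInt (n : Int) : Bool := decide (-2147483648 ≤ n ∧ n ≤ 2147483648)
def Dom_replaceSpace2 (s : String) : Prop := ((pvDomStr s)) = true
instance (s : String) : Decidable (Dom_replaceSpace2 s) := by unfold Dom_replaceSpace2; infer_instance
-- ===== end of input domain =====

-- B replaces A's count pass + preallocated backward fill by the idiomatic single str.replace call.

-- ===== PORT A =====
-- The while loop of A. Python's condition `index_origin >= 0 & (index_new > index_origin)`
-- parses as `index_origin >= (0 & bool)` = `index_origin >= 0`; ported as exactly that test.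
-- The writes new_string[index_new] always hit indices 0 ≤ index_new < len(new_string)
-- (the counting pass guarantees it, see the invariant lemma below), so `.toNat` on the
-- write index is exact here (Python's negative wraparound is never reached).
def pvLoopA (cs : List Char) (idxO : Int) (idxN : Int) (ns : List (Option Char)) :
    List (Option Char) :=
  if _h : 0 ≤ idxO then
    match PySem.List.pyGet? cs idxO with
    | some c =>
      if c = ' ' then
        pvLoopA cs (idxO - 1) (idxN - 3)
          (((ns.set idxN.toNat (some '0')).set (idxN - 1).toNat (some '2')).set
            (idxN - 2).toNat (some '%'))
      else
        pvLoopA cs (idxO - 1) (idxN - 1) (ns.set idxN.toNat (some c))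
    | none => ns
  else ns
termination_by (idxO + 1).toNat
decreasing_by all_goals omega

-- ''.join(new_string): every cell is filled (never None) when the loop ends, so the
-- Option.getD default is never consulted; Python would raise TypeError on a leftover None.
def replaceSpace2 (s : String) : String :=
  let cs := s.toList
  let numSpace : Int := cs.foldl (fun n i => if i = ' ' then n + 1 else n) 0
  let newLength : Int := (cs.length : Int) + 2 * numSpace
  let indexOrigin : Int := (cs.length : Int) - 1
  let indexNew : Int := newLength - 1
  let newString : List (Option Char) := List.replicate newLength.toNat none
  String.ofList ((pvLoopA cs indexOrigin indexNew newString).map (fun o => o.getD ' '))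

-- ===== PORT B =====
def replaceSpace2_alt (s : String) : String := PySem.Str.replace s " " "%20"

-- ===== PRECONDITION & SPEC =====
def Spec_replaceSpace2 (s : String) (out : String) : Prop := out = replaceSpace2_alt s
instance (s : String) (out : String) : Decidable (Spec_replaceSpace2 s out) := by unfold Spec_replaceSpace2; infer_instance

-- ===== CLAIM (what is proved, stated in full; the proofs are below) =====
def Claim_equal_replaceSpace2 : Prop := ∀ (s : String), Dom_replaceSpace2 s → Spec_replaceSpace2 s (replaceSpace2 s)

-- ===== LEMMAS AND PROOFS =====

-- the common specification: each ' ' becomes "%20", every other char stays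
def pvRepl : List Char → List Char
  | [] => []
  | c :: t => (if c = ' ' then ['%', '2', '0'] else [c]) ++ pvRepl t

theorem pvRepl_append (a b : List Char) : pvRepl (a ++ b) = pvRepl a ++ pvRepl b := by
  induction a with
  | nil => simp [pvRepl]
  | cons c t ih => simp [pvRepl, ih]

theorem pvRepl_length (cs : List Char) :
    (pvRepl cs).length = cs.length + 2 * cs.count ' ' := by
  induction cs with
  | nil => simp [pvRepl]
  | cons c t ih =>
    by_cases h : c = ' ' <;> simp [pvRepl, h, ih] <;> omega

theorem pvFold_count (cs : List Char) (n : Int) :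
    cs.foldl (fun n i => if i = ' ' then n + 1 else n) n = n + (cs.count ' ' : Int) := by
  induction cs generalizing n with
  | nil => simp
  | cons c t ih =>
    by_cases h : c = ' ' <;> simp [List.foldl_cons, h, ih]; ring

theorem pvSet_replicate {α : Type} (n : Nat) (d : List (Option α)) (v : α) :
    ((List.replicate (n + 1) (none : Option α)) ++ d).set n (some v) =
      List.replicate n (none : Option α) ++ some v :: d := by
  induction n with
  | zero => simp
  | succ m ih => simpa [List.replicate_succ] using ih

theorem pvLoopA_spec (cs : List Char) :
    ∀ (q : List Char) (d : List (Option Char)), q <+: cs →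
      pvLoopA cs ((q.length : Int) - 1) (((pvRepl q).length : Int) - 1)
          (List.replicate (pvRepl q).length none ++ d) =
        (pvRepl q).map some ++ d := by
  intro q
  induction q using List.reverseRecOn with
  | nil => intro d _; rw [pvLoopA]; simp [pvRepl]
  | append_singleton p c ih =>
    intro d hpre
    have hget : PySem.List.pyGet? cs ((p ++ [c]).length - 1 : Int) = some c := by
      obtain ⟨r, hr⟩ := hpre
      have : ((p ++ [c]).length - 1 : Int) = (p.length : Nat) := by simp
      rw [this, PySem.List.pyGet?_natCast]
      simp [← hr]
    have hpre' : p <+: cs := (List.prefix_append p [c]).trans hpre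
    have hrepl : pvRepl (p ++ [c]) = pvRepl p ++ (if c = ' ' then ['%', '2', '0'] else [c]) := by
      simp [pvRepl_append, pvRepl]
    rw [pvLoopA]
    have h0 : (0 : Int) ≤ (p ++ [c]).length - 1 := by simp
    rw [dif_pos h0, hget]
    dsimp only
    set L := (pvRepl p).length with hL
    by_cases hc : c = ' '
    · rw [if_pos hc]
      have hlen : (pvRepl (p ++ [c])).length = L + 3 := by rw [hrepl, if_pos hc]; simp [hL]
      have e1 : (((pvRepl (p ++ [c])).length : Int) - 1).toNat = L + 2 := by omega
      have e2 : (((pvRepl (p ++ [c])).length : Int) - 1 - 1).toNat = L + 1 := by omega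
      have e3 : (((pvRepl (p ++ [c])).length : Int) - 1 - 2).toNat = L := by omega
      have hns :
          (((List.replicate (pvRepl (p ++ [c])).length (none : Option Char) ++ d).set
              (((pvRepl (p ++ [c])).length : Int) - 1).toNat (some '0')).set
              (((pvRepl (p ++ [c])).length : Int) - 1 - 1).toNat (some '2')).set
              (((pvRepl (p ++ [c])).length : Int) - 1 - 2).toNat (some '%') =
            List.replicate L (none : Option Char) ++ some '%' :: some '2' :: some '0' :: d := by
        rw [e1, e2, e3, hlen]
        have s1 := pvSet_replicate (α := Char) (L + 2) d '0'
        have s2 := pvSet_replicate (α := Char) (L + 1) (some '0' :: d) '2'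
        have s3 := pvSet_replicate (α := Char) L (some '2' :: some '0' :: d) '%'
        simp [s1, s2, s3]
      rw [hns]
      have eO : ((p ++ [c]).length : Int) - 1 - 1 = (p.length : Int) - 1 := by simp
      have eN : ((pvRepl (p ++ [c])).length : Int) - 1 - 3 = (L : Int) - 1 := by omega
      rw [eO, eN, hL, ih (some '%' :: some '2' :: some '0' :: d) hpre']
      simp [pvRepl_append, pvRepl, hc]
    · rw [if_neg hc]
      have hlen : (pvRepl (p ++ [c])).length = L + 1 := by rw [hrepl, if_neg hc]; simp [hL]
      have e1 : (((pvRepl (p ++ [c])).length : Int) - 1).toNat = L := by omega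
      have hns :
          (List.replicate (pvRepl (p ++ [c])).length (none : Option Char) ++ d).set
              (((pvRepl (p ++ [c])).length : Int) - 1).toNat (some c) =
            List.replicate L (none : Option Char) ++ some c :: d := by
        rw [e1, hlen]; exact pvSet_replicate (α := Char) L d c
      rw [hns]
      have eO : ((p ++ [c]).length : Int) - 1 - 1 = (p.length : Int) - 1 := by simp
      have eN : ((pvRepl (p ++ [c])).length : Int) - 1 - 1 = (L : Int) - 1 := by omega
      rw [eO, eN, hL, ih (some c :: d) hpre']
      simp [pvRepl_append, pvRepl, hc]

theorem pvA_eq (s : String) : replaceSpace2 s = String.ofList (pvRepl s.toList) := by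
  have hspec := pvLoopA_spec s.toList s.toList [] List.prefix_rfl
  simp only [List.append_nil] at hspec
  simp only [replaceSpace2]
  rw [pvFold_count]
  have h1 : ((s.toList.length : Int) + 2 * ((0 : Int) + (s.toList.count ' ' : Int))) =
      ((pvRepl s.toList).length : Int) := by
    rw [pvRepl_length]; push_cast; ring
  rw [h1, Int.toNat_natCast, hspec]
  simp [List.map_map]

theorem pvGo_spec : ∀ (l : List Char) (fuel : Nat) (acc : List Char), l.length ≤ fuel →
    PySem.Chars.replace.go [' '] ['%', '2', '0'] fuel l acc = acc.reverse ++ pvRepl l := by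
  intro l
  induction l with
  | nil =>
    intro fuel acc _
    cases fuel <;> rw [PySem.Chars.replace.go] <;> simp [pvRepl]
  | cons c t ih =>
    intro fuel acc hf
    cases fuel with
    | zero => simp at hf
    | succ f =>
      rw [PySem.Chars.replace.go]
      by_cases hc : c = ' '
      · rw [if_pos (by simp [List.isPrefixOf, hc])]
        simp only [List.length_cons, List.length_nil, List.drop_succ_cons, List.drop_zero]
        rw [ih f _ (by simpa using hf)]
        simp [pvRepl, hc]
      · rw [if_neg (by simp [List.isPrefixOf]; exact fun h => hc h.symm)]
        rw [ih f _ (by simpa using hf)]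
        simp [pvRepl, hc]

theorem pvB_eq (s : String) : replaceSpace2_alt s = String.ofList (pvRepl s.toList) := by
  unfold replaceSpace2_alt PySem.Str.replace PySem.Chars.replace
  rw [show (" " : String).toList = [' '] from rfl,
    show ("%20" : String).toList = ['%', '2', '0'] from rfl]
  rw [if_neg (by simp)]
  rw [pvGo_spec s.toList s.toList.length [] le_rfl]
  simp

-- ===== VERDICT (by name: the statement is the Claim_ definition above) =====
theorem replaceSpace2_spec : Claim_equal_replaceSpace2 := by
  intro s _
  unfold Spec_replaceSpace2
  rw [pvA_eq, pvB_eq]
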